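-- pv_equiv track=rewrite | github.com/shivesh-ganju/Hidden-Markov-Model-Viterbi | preprocessing.py | createTransitionMap
-- ===== SOURCE A (Python) =====
-- def createTransitionMap(tag_list):
-- 	transition = {}
-- 	for i in range(0,len(tag_list)-1):
-- 		if tag_list[i]=='end':
-- 			continue
-- 		if tag_list[i] in transition:
-- 			if tag_list[i+1] in transition[tag_list[i]]:
-- 				transition[tag_list[i]][tag_list[i+1]]+=1
-- 			else:
-- 				transition[tag_list[i]][tag_list[i+1]]=1
-- 		else:
-- 			transition[tag_list[i]] = {tag_list[i+1]:1}
-- 	return transition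
-- ===== SOURCE B (Python) =====
-- def createTransitionMap(tag_list):
-- 	counts = {}
-- 	for a, b in zip(tag_list, tag_list[1:]):
-- 		if a != 'end':
-- 			counts[(a, b)] = counts.get((a, b), 0) + 1
-- 	transition = {}
-- 	for (a, b), c in counts.items():
-- 		transition.setdefault(a, {})[b] = c
-- 	return transition
-- ===== Notes on version B (the rewrite author's own statement) =====
-- stated objective: alternative
-- what changed: B replaces A's nested-dict branching loop (four cases over index pairs) by a flat frequency pass over zip(tag_list, tag_list[1:]) counted into a dict keyed by the (source, target) tuple, followed by a separate reshape pass that groups the flat counts into the nested dict.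
import Mathlib
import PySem

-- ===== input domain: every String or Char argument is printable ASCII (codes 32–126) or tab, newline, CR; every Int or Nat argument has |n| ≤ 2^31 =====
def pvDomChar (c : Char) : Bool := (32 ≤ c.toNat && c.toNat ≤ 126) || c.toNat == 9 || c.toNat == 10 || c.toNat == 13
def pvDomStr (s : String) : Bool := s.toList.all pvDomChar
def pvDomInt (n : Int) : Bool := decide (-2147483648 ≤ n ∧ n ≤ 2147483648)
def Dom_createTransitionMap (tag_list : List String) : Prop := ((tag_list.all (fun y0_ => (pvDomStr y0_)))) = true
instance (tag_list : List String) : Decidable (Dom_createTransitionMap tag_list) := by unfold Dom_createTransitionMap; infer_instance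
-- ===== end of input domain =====

-- B replaces A's nested-dict branching loop by a flat (source, target) pair count
-- followed by a separate reshape pass; same O(n) cost, different structure ("alternative").


-- ===== PORT A =====
-- loop body of A for one index i, with a = tag_list[i], b = tag_list[i+1]
def pvStepA (t : PySem.Dict String (PySem.Dict String Int)) (a b : String) :
    PySem.Dict String (PySem.Dict String Int) :=
  if a == "end" then t
  else if t.contains a then
    if (t.getD a PySem.Dict.empty).contains b then
      t.insert a ((t.getD a PySem.Dict.empty).insert b
        ((t.getD a PySem.Dict.empty).getD b 0 + 1))
    else
      t.insert a ((t.getD a PySem.Dict.empty).insert b 1)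
  else
    t.insert a ((PySem.Dict.empty : PySem.Dict String Int).insert b 1)

def createTransitionMap (tag_list : List String) : List (String × List (String × Int)) :=
  (((PySem.List.pyRange 0 (PySem.List.len tag_list - 1) 1).foldl
      (fun t i => pvStepA t (PySem.List.pyGetD tag_list i "") (PySem.List.pyGetD tag_list (i + 1) ""))
      PySem.Dict.empty : PySem.Dict String (PySem.Dict String Int))).items.map
    (fun p => (p.1, p.2.items))

-- ===== PORT B =====
def createTransitionMap_alt (tag_list : List String) : List (String × List (String × Int)) :=
  (((tag_list.zip (PySem.List.slice tag_list (some 1) none)).foldl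
      (fun d p => if p.1 != "end" then d.insert p (d.getD p 0 + 1) else d)
      (PySem.Dict.empty : PySem.Dict (String × String) Int)).items.foldl
      (fun t q => t.insert q.1.1 ((t.getD q.1.1 PySem.Dict.empty).insert q.1.2 q.2))
      (PySem.Dict.empty : PySem.Dict String (PySem.Dict String Int))).items.map
    (fun p => (p.1, p.2.items))

-- ===== PRECONDITION & SPEC =====
def Spec_createTransitionMap (tag_list : List String) (out : List (String × List (String × Int))) : Prop := out = createTransitionMap_alt tag_list
instance (tag_list : List String) (out : List (String × List (String × Int))) : Decidable (Spec_createTransitionMap tag_list out) := by unfold Spec_createTransitionMap; infer_instance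

-- ===== CLAIM (what is proved, stated in full; the proofs are below) =====
def Claim_equal_createTransitionMap : Prop := ∀ (tag_list : List String), Dom_createTransitionMap tag_list → Spec_createTransitionMap tag_list (createTransitionMap tag_list)

-- ===== LEMMAS AND PROOFS =====

-- xs[1:] is the tail
theorem pv_slice_one (xs : List String) : PySem.List.slice xs (some 1) none = xs.tail := by
  rw [PySem.List.slice_some_none]
  cases xs <;> simp [PySem.List.clampIdx]

-- the adjacent-pair list, as A's index loop sees it
theorem pv_zip_tail (xs : List String) :
    xs.zip xs.tail = (List.range (xs.length - 1)).map (fun k => (xs.getD k "", xs.getD (k + 1) "")) := by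
  induction xs with
  | nil => simp
  | cons x t ih =>
    cases t with
    | nil => simp
    | cons y u =>
      simp only [List.tail_cons, List.zip_cons_cons, List.length_cons, Nat.add_sub_cancel]
      rw [List.range_succ_eq_map]
      simp only [List.map_cons, List.map_map]
      refine List.cons_eq_cons.mpr ⟨rfl, ?_⟩
      rw [List.tail_cons] at ih
      rw [ih]
      simp [Function.comp_def]

-- A's index loop is a fold over the adjacent pairs
theorem pv_foldA_eq_zip {σ : Type} (xs : List String) (f : σ → String → String → σ) (init : σ) :
    (PySem.List.pyRange 0 (PySem.List.len xs - 1) 1).foldl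
      (fun t i => f t (PySem.List.pyGetD xs i "") (PySem.List.pyGetD xs (i + 1) "")) init
    = (xs.zip xs.tail).foldl (fun t p => f t p.1 p.2) init := by
  rw [pv_zip_tail, PySem.List.pyRange_one]
  simp only [PySem.List.len]
  have h1 : ((xs.length : Int) - 1 - 0).toNat = xs.length - 1 := by omega
  rw [h1, List.foldl_map, List.foldl_map]
  apply PySem.List.foldl_congr_mem
  intro acc k hk
  have h2 : (0 : Int) + (k : Int) = ((k : Nat) : Int) := by omega
  rw [h2, PySem.List.pyGetD_natCast]
  have h3 : ((k : Nat) : Int) + 1 = ((k + 1 : Nat) : Int) := by omega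
  rw [h3, PySem.List.pyGetD_natCast]

-- a loop that skips elements failing c is a fold over the filtered list
theorem pv_foldl_skip {α σ : Type} (l : List α) (c : α → Bool) (g : σ → α → σ) (init : σ) :
    l.foldl (fun acc x => if c x then acc else g acc x) init
    = (l.filter (fun x => !c x)).foldl g init := by
  induction l generalizing init with
  | nil => rfl
  | cons x l ih =>
    by_cases h : c x <;> simp [h, ih]

-- dedup commutes with mapping out of a dedup
theorem pv_ofList_map_ofList {α β : Type} [BEq α] [LawfulBEq α] [BEq β] [LawfulBEq β]
    (xs : List α) (f : α → β) :
    PySem.Set.ofList ((PySem.Set.ofList xs).map f) = PySem.Set.ofList (xs.map f) := by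
  induction xs using List.reverseRecOn with
  | nil => rfl
  | append_singleton xs x ih =>
    rw [PySem.Set.ofList_append_singleton, PySem.Set.add_eq_ite]
    by_cases h : x ∈ PySem.Set.ofList xs
    · rw [if_pos h, ih, List.map_append, List.map_singleton, PySem.Set.ofList_append_singleton,
          PySem.Set.add_of_mem]
      have hx : x ∈ xs := (PySem.Set.mem_ofList xs x).mp h
      exact (PySem.Set.mem_ofList (xs.map f) (f x)).mpr (List.mem_map_of_mem hx)
    · rw [if_neg h, List.map_append, List.map_singleton, PySem.Set.ofList_append_singleton,
          List.map_append, List.map_singleton, PySem.Set.ofList_append_singleton, ih]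

-- generic: value at key a after an insert-at-key loop
theorem pv_getD_foldl_insert_dep {κ ν β : Type} [BEq κ] [LawfulBEq κ]
    (l : List β) (key : β → κ) (g : ν → β → ν) (dflt : ν) (t : PySem.Dict κ ν) (a : κ) :
    (l.foldl (fun t x => t.insert (key x) (g (t.getD (key x) dflt) x)) t).getD a dflt
    = (l.filter (fun x => key x == a)).foldl g (t.getD a dflt) := by
  induction l generalizing t with
  | nil => rfl
  | cons x l ih =>
    simp only [List.foldl_cons, List.filter_cons]
    rw [ih]
    by_cases h : (key x == a) = true
    · have he : key x = a := eq_of_beq h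
      rw [if_pos h, List.foldl_cons, he, PySem.Dict.getD_insert_self]
    · have hne : a ≠ key x := fun he => h (by rw [he]; exact BEq.rfl)
      rw [if_neg h, PySem.Dict.getD_insert_of_ne _ _ _ hne]

-- A's four branches collapse to one insert of a bumped inner dict
theorem pv_stepA_eq (t : PySem.Dict String (PySem.Dict String Int)) (a b : String) (h : (a == "end") = false) :
    pvStepA t a b = t.insert a ((t.getD a PySem.Dict.empty).insert b ((t.getD a PySem.Dict.empty).getD b 0 + 1)) := by
  unfold pvStepA
  rw [if_neg (by simp [h])]
  by_cases hc : t.contains a = true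
  · rw [if_pos hc]
    by_cases hb : (t.getD a PySem.Dict.empty).contains b = true
    · rw [if_pos hb]
    · rw [if_neg hb]
      rw [PySem.Dict.getD_of_not_contains (t.getD a PySem.Dict.empty) (0 : Int) (by simpa using hb)]
      norm_num
  · rw [if_neg hc]
    rw [PySem.Dict.getD_of_not_contains t PySem.Dict.empty (by simpa using hc)]
    rw [PySem.Dict.getD_of_not_contains PySem.Dict.empty (0 : Int) (by simp)]
    norm_num

-- counting a pair = counting its target inside the fibre of its source
theorem pv_count_fibre (a b : String) (qs : List (String × String)) :
    List.count (a, b) qs = List.count b ((qs.filter (fun p => p.1 == a)).map Prod.snd) := by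
  induction qs with
  | nil => rfl
  | cons p qs ih =>
    rw [List.count_cons, List.filter_cons]
    by_cases h1 : p.1 = a
    · have hne : (p = (a, b)) ↔ (p.2 = b) := by
        constructor
        · intro hh; rw [hh]
        · intro hh; exact Prod.ext_iff.mpr ⟨h1, hh⟩
      by_cases h2 : p.2 = b
      · simp [h1, h2, hne, ih]
      · simp [h1, h2, hne, ih]
    · have hne : ¬ (p = (a, b)) := by intro hh; exact h1 (by rw [hh])
      simp [h1, hne, ih]

-- projecting snd commutes with dedup on the fibre of fst = a
theorem pv_set_snd_fibre (a : String) (qs : List (String × String)) :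
    PySem.Set.ofList ((qs.filter (fun p => p.1 == a)).map Prod.snd)
    = ((PySem.Set.ofList qs).filter (fun p => p.1 == a)).map Prod.snd := by
  induction qs using List.reverseRecOn with
  | nil => rfl
  | append_singleton qs p ih =>
    rw [List.filter_append, PySem.Set.ofList_append_singleton, PySem.Set.add_eq_ite, List.filter_singleton]
    by_cases hm : p ∈ PySem.Set.ofList qs
    · rw [if_pos hm]
      by_cases h1 : p.1 = a
      · simp only [h1, beq_self_eq_true, cond_true, List.map_append, List.map_singleton,
          PySem.Set.ofList_append_singleton, ih]
        rw [PySem.Set.add_of_mem]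
        exact List.mem_map_of_mem (List.mem_filter.mpr ⟨hm, by simpa using h1⟩)
      · simp only [beq_eq_false_iff_ne.mpr h1, cond_false, List.append_nil]
        exact ih
    · rw [if_neg hm, List.filter_append, List.filter_singleton]
      by_cases h1 : p.1 = a
      · simp only [h1, beq_self_eq_true, cond_true, List.map_append, List.map_singleton,
          PySem.Set.ofList_append_singleton, ih]
        rw [PySem.Set.add_of_not_mem]
        intro hmem
        obtain ⟨q, hq, hq2⟩ := List.mem_map.mp hmem
        obtain ⟨hqS, hqa⟩ := List.mem_filter.mp hq
        have : q = p := Prod.ext_iff.mpr ⟨by rw [h1]; simpa using hqa, hq2⟩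
        exact hm (this ▸ hqS)
      · simp only [beq_eq_false_iff_ne.mpr h1, cond_false, List.append_nil]
        exact ih

-- the heart: reshaping the pair counter = A's nested counting loop, over any pair list
theorem pv_main (qs : List (String × String)) :
    ((PySem.Dict.counter qs).items.foldl
      (fun t q => t.insert q.1.1 ((t.getD q.1.1 PySem.Dict.empty).insert q.1.2 q.2))
      PySem.Dict.empty : PySem.Dict String (PySem.Dict String Int))
    = qs.foldl (fun t p => t.insert p.1 ((t.getD p.1 PySem.Dict.empty).insert p.2
        ((t.getD p.1 PySem.Dict.empty).getD p.2 0 + 1))) PySem.Dict.empty := by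
  apply PySem.Dict.ext
  have hndB : (((PySem.Dict.counter qs).items.foldl
      (fun t q => t.insert q.1.1 ((t.getD q.1.1 PySem.Dict.empty).insert q.1.2 q.2))
      PySem.Dict.empty : PySem.Dict String (PySem.Dict String Int))).keys.Nodup :=
    PySem.Dict.nodup_keys_foldl_insert_key _ _ _ _ PySem.Dict.nodup_keys_empty
  have hndA : ((qs.foldl (fun t p => t.insert p.1 ((t.getD p.1 PySem.Dict.empty).insert p.2
        ((t.getD p.1 PySem.Dict.empty).getD p.2 0 + 1))) PySem.Dict.empty :
        PySem.Dict String (PySem.Dict String Int))).keys.Nodup :=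
    PySem.Dict.nodup_keys_foldl_insert_key _ _ _ _ PySem.Dict.nodup_keys_empty
  rw [PySem.Dict.items_eq_map_keys _ hndB PySem.Dict.empty,
      PySem.Dict.items_eq_map_keys _ hndA PySem.Dict.empty]
  have hkeys : (((PySem.Dict.counter qs).items.foldl
      (fun t q => t.insert q.1.1 ((t.getD q.1.1 PySem.Dict.empty).insert q.1.2 q.2))
      PySem.Dict.empty : PySem.Dict String (PySem.Dict String Int))).keys
      = ((qs.foldl (fun t p => t.insert p.1 ((t.getD p.1 PySem.Dict.empty).insert p.2
        ((t.getD p.1 PySem.Dict.empty).getD p.2 0 + 1))) PySem.Dict.empty :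
        PySem.Dict String (PySem.Dict String Int))).keys := by
    rw [PySem.Dict.keys_foldl_insert_key, PySem.Dict.keys_foldl_insert_key,
        PySem.Dict.keys_empty, PySem.Set.update_nil_left, PySem.Set.update_nil_left,
        PySem.Dict.items_counter, List.map_map]
    have h1 : ((fun q : (String × String) × Int => q.1.1) ∘ (fun k : String × String => (k, (List.count k qs : Int))))
        = (fun p : String × String => p.1) := by funext k; rfl
    rw [h1]
    exact pv_ofList_map_ofList qs (fun p => p.1)
  rw [hkeys]
  apply List.map_congr_left
  intro a _
  refine congrArg (fun m => (a, m)) ?_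
  -- A side value at a is the counter of the targets in the fibre of a
  have hA : ((qs.foldl (fun t p => t.insert p.1 ((t.getD p.1 PySem.Dict.empty).insert p.2
        ((t.getD p.1 PySem.Dict.empty).getD p.2 0 + 1))) PySem.Dict.empty :
        PySem.Dict String (PySem.Dict String Int))).getD a PySem.Dict.empty
      = PySem.Dict.counter ((qs.filter (fun p => p.1 == a)).map Prod.snd) := by
    have h := pv_getD_foldl_insert_dep qs (fun p : String × String => p.1)
      (fun (m : PySem.Dict String Int) (p : String × String) => m.insert p.2 (m.getD p.2 0 + 1))
      PySem.Dict.empty PySem.Dict.empty a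
    refine h.trans ?_
    rw [PySem.Dict.getD_empty, ← PySem.Dict.foldl_insert_getD_add_one_eq_counter,
        List.foldl_map]
  -- B side value at a is the same counter
  have hB : (((PySem.Dict.counter qs).items.foldl
      (fun t q => t.insert q.1.1 ((t.getD q.1.1 PySem.Dict.empty).insert q.1.2 q.2))
      PySem.Dict.empty : PySem.Dict String (PySem.Dict String Int))).getD a PySem.Dict.empty
      = PySem.Dict.counter ((qs.filter (fun p => p.1 == a)).map Prod.snd) := by
    have h := pv_getD_foldl_insert_dep (PySem.Dict.counter qs).items
      (fun q : (String × String) × Int => q.1.1)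
      (fun m (q : (String × String) × Int) => m.insert q.1.2 q.2)
      PySem.Dict.empty PySem.Dict.empty a
    refine h.trans ?_
    rw [PySem.Dict.getD_empty, PySem.Dict.items_counter, List.filter_map, List.foldl_map]
    have h2 : (((fun q : (String × String) × Int => q.1.1 == a) ∘ (fun k : String × String => (k, (List.count k qs : Int)))))
        = (fun k : String × String => k.1 == a) := by funext k; rfl
    rw [h2]
    -- fold of fresh distinct inserts: compute its items and compare with the counter's
    apply PySem.Dict.ext
    have hnod : (((PySem.Set.ofList qs).filter (fun k : String × String => k.1 == a)).map
        (fun x : String × String => x.2)).Nodup := by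
      apply List.Nodup.map_on
      · intro x hx y hy hxy
        have hx' := List.mem_filter.mp hx
        have hy' := List.mem_filter.mp hy
        exact Prod.ext_iff.mpr ⟨by rw [(by simpa using hx'.2 : x.1 = a), (by simpa using hy'.2 : y.1 = a)], hxy⟩
      · exact List.Nodup.filter _ (PySem.Set.nodup_ofList qs)
    have hfresh := PySem.Dict.items_foldl_insert_fresh
      ((PySem.Set.ofList qs).filter (fun k : String × String => k.1 == a))
      (fun x : String × String => x.2) (fun x => (List.count x qs : Int)) PySem.Dict.empty
      (fun _ _ => PySem.Dict.contains_empty _) hnod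
    rw [hfresh, PySem.Dict.items_counter, pv_set_snd_fibre a qs, List.map_map]
    have hemp : (PySem.Dict.empty : PySem.Dict String Int).items = [] := rfl
    rw [hemp, List.nil_append]
    apply List.map_congr_left
    intro k hk
    have hk' := List.mem_filter.mp hk
    have hka : k.1 = a := by simpa using hk'.2
    have hkp : k = (a, k.2) := Prod.ext_iff.mpr ⟨hka, rfl⟩
    simp only [Function.comp_def]
    refine congrArg (fun c => (k.2, c)) ?_
    rw [hkp, ← pv_count_fibre a k.2 qs]
  rw [hA, hB]

-- ===== VERDICT (by name: the statement is the Claim_ definition above) =====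
theorem createTransitionMap_spec : Claim_equal_createTransitionMap := by
  intro tag_list _
  unfold Spec_createTransitionMap createTransitionMap createTransitionMap_alt
  rw [pv_slice_one]
  rw [pv_foldA_eq_zip tag_list pvStepA PySem.Dict.empty]
  -- A's fold: pull the 'end' skip out as a filter
  have hstep : ∀ (t : PySem.Dict String (PySem.Dict String Int)) (p : String × String),
      pvStepA t p.1 p.2 = if (p.1 == "end") then t
        else t.insert p.1 ((t.getD p.1 PySem.Dict.empty).insert p.2
          ((t.getD p.1 PySem.Dict.empty).getD p.2 0 + 1)) := by
    intro t p
    by_cases h : (p.1 == "end") = true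
    · rw [if_pos h]; unfold pvStepA; rw [if_pos h]
    · rw [if_neg h]; exact pv_stepA_eq t p.1 p.2 (by simpa using h)
  rw [PySem.List.foldl_congr_mem _ _ _ _ (fun t p _ => hstep t p)]
  rw [pv_foldl_skip]
  -- B's count loop: the kept-if is a fold over the same filtered list
  have hkeep : (tag_list.zip tag_list.tail).foldl
      (fun (d : PySem.Dict (String × String) Int) p => if p.1 != "end" then d.insert p (d.getD p 0 + 1) else d)
      PySem.Dict.empty
      = ((tag_list.zip tag_list.tail).filter (fun p => !(p.1 == "end"))).foldl
        (fun d p => d.insert p (d.getD p 0 + 1)) PySem.Dict.empty := by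
    rw [← List.foldl_filter]
    apply PySem.List.foldl_congr_mem
    intro acc p _
    simp
  rw [hkeep, PySem.Dict.foldl_insert_getD_add_one_eq_counter,
      pv_main ((tag_list.zip tag_list.tail).filter (fun p => !(p.1 == "end")))]
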